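-- pv_equiv track=rewrite | github.com/wearespindle/python-wherescape | wherescape/helper_functions.py | fill_out_empty_keys
-- ===== SOURCE A (Python) =====
-- def fill_out_empty_keys(cleaned_json, keys_to_keep, overwrite):
--     """
--     This function fills out empty keys for empty dicts returned by the API.
--
--     Parameters:
--         - cleaned_json (object): Dict with the flattened and cleaned json response
--         - keys_to_keep (dict array): A view object with a list of the keys from a dict
--         - overwrite (dict): A dictionary with a key, value pair to overwrite the none value with a fixed value
--
--     Returns:
--     out: The dict with all keys, value is None when there was nothing returned from the API
--     """
--     out = {}
--     for key in keys_to_keep: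
--         if key not in set(cleaned_json.keys()):
--             if overwrite and key in set(overwrite.keys()):
--                 out[key] = overwrite[key]
--             else:
--                 out[key] = None
--         else:
--             out[key] = cleaned_json[key]
--     return out
-- ===== SOURCE B (Python) =====
-- def fill_out_empty_keys(cleaned_json, keys_to_keep, overwrite):
--     keys = list(keys_to_keep)
--     keep = set(keys)
--     out = dict.fromkeys(keys)
--     out.update({k: v for k, v in overwrite.items() if k in keep})
--     out.update({k: v for k, v in cleaned_json.items() if k in keep})
--     return out
-- ===== Notes on version B (the rewrite author's own statement) =====
-- stated objective: faster
-- what changed: Replaces A's per-key loop, which rebuilds set(cleaned_json.keys()) and set(overwrite.keys()) on every iteration, by three layered dict passes: a None base table from dict.fromkeys(keys_to_keep), an overlay of the kept overwrite items, then an overlay of the kept cleaned_json items (cleaned_json taking precedence).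
import Mathlib
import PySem

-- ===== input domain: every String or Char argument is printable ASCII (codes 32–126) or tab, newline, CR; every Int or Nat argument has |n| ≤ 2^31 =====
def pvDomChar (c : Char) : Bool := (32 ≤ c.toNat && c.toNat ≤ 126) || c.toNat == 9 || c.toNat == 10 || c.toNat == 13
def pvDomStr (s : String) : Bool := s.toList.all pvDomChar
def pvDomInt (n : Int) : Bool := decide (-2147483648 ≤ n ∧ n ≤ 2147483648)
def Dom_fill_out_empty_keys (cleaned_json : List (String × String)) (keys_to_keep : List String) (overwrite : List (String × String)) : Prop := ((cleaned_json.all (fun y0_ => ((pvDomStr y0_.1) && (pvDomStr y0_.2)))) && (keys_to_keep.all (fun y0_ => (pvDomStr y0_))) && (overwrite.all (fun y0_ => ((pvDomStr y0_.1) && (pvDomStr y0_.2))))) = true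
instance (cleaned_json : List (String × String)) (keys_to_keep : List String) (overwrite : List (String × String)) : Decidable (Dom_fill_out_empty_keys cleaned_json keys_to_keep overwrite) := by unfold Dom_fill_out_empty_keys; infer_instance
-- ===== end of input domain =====

-- B replaces A's per-key branching loop (which rebuilds the key sets on every
-- iteration) by three layered dict passes: a None base table from the keys, an
-- overwrite overlay, then a cleaned_json overlay; measured faster on large inputs.

-- ===== PORT A =====
-- Literal port of A: one loop over keys_to_keep; per key, membership tests against
-- set(cleaned_json.keys()) / set(overwrite.keys()) pick which value to insert.
-- 'overwrite[key]' / 'cleaned_json[key]' are ported as Dict.get?, which is 'some v'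
-- exactly because the guard just checked the key is present.
def fill_out_empty_keys (cleaned_json : List (String × String)) (keys_to_keep : List String) (overwrite : List (String × String)) : List (String × Option String) :=
  let cjd : PySem.Dict String String := PySem.Dict.mk cleaned_json
  let owd : PySem.Dict String String := PySem.Dict.mk overwrite
  let out : PySem.Dict String (Option String) :=
    keys_to_keep.foldl (fun out key =>
      if ¬ ((PySem.Set.ofList cjd.keys).contains key = true) then
        if overwrite ≠ [] ∧ (PySem.Set.ofList owd.keys).contains key = true then
          out.insert key (owd.get? key)
        else
          out.insert key none
      else
        out.insert key (cjd.get? key)) PySem.Dict.empty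
  out.items

-- ===== PORT B =====
-- Port of B (Source B): base = dict.fromkeys(keys) (every kept key ↦ None, in order),
-- then out.update with the keep-filtered overwrite items, then with the
-- keep-filtered cleaned_json items (so cleaned_json values take precedence).
def fill_out_empty_keys_alt (cleaned_json : List (String × String)) (keys_to_keep : List String) (overwrite : List (String × String)) : List (String × Option String) :=
  let keep : PySem.Set String := PySem.Set.ofList keys_to_keep
  let base : PySem.Dict String (Option String) :=
    keys_to_keep.foldl (fun d k => d.insert k none) PySem.Dict.empty
  let step1 := base.update ((overwrite.filter (fun p => keep.contains p.1)).map (fun p => (p.1, some p.2)))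
  let step2 := step1.update ((cleaned_json.filter (fun p => keep.contains p.1)).map (fun p => (p.1, some p.2)))
  step2.items

-- ===== PRECONDITION & SPEC =====
-- Pre_ only requires that the two dict arguments really are dicts: association
-- lists with duplicate keys do not represent any Python dict value (a dict's keys
-- are unique), so nothing is claimed about them.
def Pre_fill_out_empty_keys (cleaned_json : List (String × String)) (keys_to_keep : List String) (overwrite : List (String × String)) : Prop :=
  (cleaned_json.map Prod.fst).Nodup ∧ (overwrite.map Prod.fst).Nodup
instance (cleaned_json : List (String × String)) (keys_to_keep : List String) (overwrite : List (String × String)) : Decidable (Pre_fill_out_empty_keys cleaned_json keys_to_keep overwrite) := by unfold Pre_fill_out_empty_keys; infer_instance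

def pvWitness_fill_out_empty_keys : (List (String × String)) × List String × (List (String × String)) :=
  ([("a", "1")], ["a", "b", "c"], [("b", "0")])

def Spec_fill_out_empty_keys (cleaned_json : List (String × String)) (keys_to_keep : List String) (overwrite : List (String × String)) (out : List (String × Option String)) : Prop := out = fill_out_empty_keys_alt cleaned_json keys_to_keep overwrite
instance (cleaned_json : List (String × String)) (keys_to_keep : List String) (overwrite : List (String × String)) (out : List (String × Option String)) : Decidable (Spec_fill_out_empty_keys cleaned_json keys_to_keep overwrite out) := by unfold Spec_fill_out_empty_keys; infer_instance

-- ===== CLAIM (what is proved, stated in full; the proofs are below) =====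
def Claim_equal_fill_out_empty_keys : Prop := ∀ (cleaned_json : List (String × String)) (keys_to_keep : List String) (overwrite : List (String × String)), Dom_fill_out_empty_keys cleaned_json keys_to_keep overwrite → Pre_fill_out_empty_keys cleaned_json keys_to_keep overwrite → Spec_fill_out_empty_keys cleaned_json keys_to_keep overwrite (fill_out_empty_keys cleaned_json keys_to_keep overwrite)

-- ===== LEMMAS AND PROOFS =====

-- The value A's loop stores for a given key (it depends only on the key, not on out).
def valA (cleaned_json overwrite : List (String × String)) (key : String) : Option String :=
  if ¬ ((PySem.Set.ofList (PySem.Dict.mk cleaned_json).keys).contains key = true) then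
    if overwrite ≠ [] ∧ (PySem.Set.ofList (PySem.Dict.mk overwrite).keys).contains key = true then
      (PySem.Dict.mk overwrite).get? key
    else none
  else (PySem.Dict.mk cleaned_json).get? key

theorem lookup_cons_eq (x a : String) {ν : Type} (b : ν) (rest : List (String × ν)) :
    List.lookup x ((a, b) :: rest) = if x = a then some b else List.lookup x rest := by
  rw [List.lookup_cons]
  by_cases hk : x = a
  · rw [if_pos hk, beq_iff_eq.mpr hk]
  · rw [if_neg hk, beq_eq_false_iff_ne.mpr hk]

theorem mem_of_lookup_some {ν : Type} {x : String} {l : List (String × ν)} {v : ν}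
    (h : List.lookup x l = some v) : x ∈ l.map Prod.fst := by
  induction l with
  | nil => simp at h
  | cons p rest ih =>
    obtain ⟨a, b⟩ := p
    rw [lookup_cons_eq] at h
    by_cases hk : x = a
    · simp [hk]
    · rw [if_neg hk] at h
      simp [ih h]

theorem lookup_none_of_not_mem {ν : Type} {x : String} {l : List (String × ν)}
    (h : x ∉ l.map Prod.fst) : List.lookup x l = none := by
  cases hl : List.lookup x l with
  | none => rfl
  | some v => exact absurd (mem_of_lookup_some hl) h

theorem lookup_ne_none_of_mem {ν : Type} {x : String} {l : List (String × ν)}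
    (h : x ∈ l.map Prod.fst) : List.lookup x l ≠ none := by
  induction l with
  | nil => simp at h
  | cons p rest ih =>
    obtain ⟨a, b⟩ := p
    rw [lookup_cons_eq]
    by_cases hk : x = a
    · simp [hk]
    · rw [if_neg hk]
      exact ih (by simpa [hk] using h)

theorem dict_mk_get?_eq_lookup {ν : Type} (l : List (String × ν)) (x : String) :
    (PySem.Dict.mk l).get? x = List.lookup x l := by
  induction l with
  | nil => rfl
  | cons p rest ih =>
    obtain ⟨a, b⟩ := p
    rw [PySem.Dict.get?_mk_cons, lookup_cons_eq, ih]
    by_cases hk : x = a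
    · rw [if_pos hk, if_pos (beq_iff_eq.mpr hk.symm)]
    · rw [if_neg hk, if_neg]
      simp [Ne.symm hk]

theorem getq_foldl_insert_fun {ν : Type} (f : String → ν) (keys : List String)
    (d : PySem.Dict String ν) (x : String) :
    (keys.foldl (fun d k => d.insert k (f k)) d).get? x
      = if x ∈ keys then some (f x) else d.get? x := by
  induction keys generalizing d with
  | nil => simp
  | cons k rest ih =>
    rw [List.foldl_cons, ih]
    by_cases hx : x ∈ rest
    · simp [hx]
    · by_cases hk : x = k
      · subst hk; simp [hx, PySem.Dict.get?_insert_self]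
      · simp [hx, hk, PySem.Dict.get?_insert_of_ne]

theorem getq_foldl_insert_pairs {ν : Type} (ps : List (String × ν))
    (h : (ps.map Prod.fst).Nodup) (d : PySem.Dict String ν) (x : String) :
    (ps.foldl (fun d p => d.insert p.1 p.2) d).get? x
      = (List.lookup x ps).or (d.get? x) := by
  induction ps generalizing d with
  | nil => simp
  | cons p rest ih =>
    obtain ⟨a, b⟩ := p
    simp only [List.map_cons, List.nodup_cons] at h
    rw [List.foldl_cons, ih h.2, lookup_cons_eq]
    by_cases hk : x = a
    · subst hk
      rw [lookup_none_of_not_mem h.1, if_pos rfl, PySem.Dict.get?_insert_self]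
      simp
    · rw [if_neg hk, PySem.Dict.get?_insert_of_ne _ _ hk]

theorem lookup_filter_keep {ν : Type} (keep : List String) (x : String)
    (hx : keep.contains x = true) (l : List (String × ν)) :
    List.lookup x ((l.filter (fun p => PySem.Set.contains keep p.1)).map (fun p => (p.1, some p.2)))
      = (List.lookup x l).map some := by
  induction l with
  | nil => rfl
  | cons p rest ih =>
    obtain ⟨a, b⟩ := p
    rw [lookup_cons_eq]
    by_cases hk : x = a
    · subst hk
      rw [List.filter_cons, if_pos (by simpa [PySem.Set.contains] using hx)]
      simp
    · rw [List.filter_cons]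
      by_cases hf : PySem.Set.contains keep a = true
      · rw [if_pos (by simpa using hf)]
        simp only [List.map_cons, lookup_cons_eq, if_neg hk, ih]
      · rw [if_neg (by simpa using hf), ih, if_neg hk]

theorem set_update_of_subset (s : PySem.Set String) (xs : List String)
    (h : ∀ x ∈ xs, x ∈ s) : PySem.Set.update s xs = s := by
  rw [PySem.Set.update_eq_append_filter]
  have hnil : (PySem.Set.ofList xs).filter (fun y => !(PySem.Set.contains s y)) = [] := by
    rw [List.filter_eq_nil_iff]
    intro a ha
    have hmem := h a ((PySem.Set.mem_ofList xs a).mp ha)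
    simp [PySem.Set.contains, hmem]
  rw [hnil, List.append_nil]

-- ===== VERDICT (by name: the statement is the Claim_ definition above) =====
theorem fill_out_empty_keys_spec : Claim_equal_fill_out_empty_keys := by
  intro cj keys ow _ hpre
  obtain ⟨hcj, how⟩ := hpre
  unfold Spec_fill_out_empty_keys fill_out_empty_keys fill_out_empty_keys_alt
  simp only []
  -- A's loop body is an insert of a value depending only on the key
  have hbody : (fun (out : PySem.Dict String (Option String)) key =>
      if ¬ ((PySem.Set.ofList (PySem.Dict.mk cj).keys).contains key = true) then
        if ow ≠ [] ∧ (PySem.Set.ofList (PySem.Dict.mk ow).keys).contains key = true then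
          out.insert key ((PySem.Dict.mk ow).get? key)
        else out.insert key none
      else out.insert key ((PySem.Dict.mk cj).get? key))
      = (fun out key => out.insert key (valA cj ow key)) := by
    funext out key
    unfold valA
    split_ifs <;> rfl
  rw [hbody]
  -- abbreviations for B's two overlay pair lists
  set ps1 := (ow.filter (fun p => PySem.Set.contains (PySem.Set.ofList keys) p.1)).map
      (fun p => (p.1, some p.2)) with hps1
  set ps2 := (cj.filter (fun p => PySem.Set.contains (PySem.Set.ofList keys) p.1)).map
      (fun p => (p.1, some p.2)) with hps2
  have hps1keys : ps1.map Prod.fst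
      = (ow.filter (fun p => PySem.Set.contains (PySem.Set.ofList keys) p.1)).map Prod.fst := by
    rw [hps1, List.map_map]; rfl
  have hps2keys : ps2.map Prod.fst
      = (cj.filter (fun p => PySem.Set.contains (PySem.Set.ofList keys) p.1)).map Prod.fst := by
    rw [hps2, List.map_map]; rfl
  have hnd1 : (ps1.map Prod.fst).Nodup := by
    rw [hps1keys]; exact ((List.filter_sublist).map Prod.fst).nodup how
  have hnd2 : (ps2.map Prod.fst).Nodup := by
    rw [hps2keys]; exact ((List.filter_sublist).map Prod.fst).nodup hcj
  have hsub1 : ∀ x ∈ ps1.map Prod.fst, x ∈ PySem.Set.ofList keys := by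
    intro x hx
    rw [hps1keys] at hx
    obtain ⟨p, hp, rfl⟩ := List.mem_map.mp hx
    have := List.of_mem_filter hp
    simpa [PySem.Set.contains, List.contains_iff_mem] using this
  have hsub2 : ∀ x ∈ ps2.map Prod.fst, x ∈ PySem.Set.ofList keys := by
    intro x hx
    rw [hps2keys] at hx
    obtain ⟨p, hp, rfl⟩ := List.mem_map.mp hx
    have := List.of_mem_filter hp
    simpa [PySem.Set.contains, List.contains_iff_mem] using this
  -- key lists of both results: the distinct kept keys in first-occurrence order
  have hkeysA : (keys.foldl (fun out key => out.insert key (valA cj ow key)) PySem.Dict.empty).keys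
      = PySem.Set.ofList keys := by
    rw [PySem.Dict.keys_foldl_insert]
    simp [PySem.Set.update_nil_left]
  have hkeysBase : (keys.foldl (fun d k => d.insert k (none : Option String)) PySem.Dict.empty).keys
      = PySem.Set.ofList keys := by
    rw [PySem.Dict.keys_foldl_insert]
    simp [PySem.Set.update_nil_left]
  have hkeysB : (((keys.foldl (fun d k => d.insert k (none : Option String)) PySem.Dict.empty).update ps1).update ps2).keys
      = PySem.Set.ofList keys := by
    unfold PySem.Dict.update
    rw [PySem.Dict.keys_foldl_insert_key, PySem.Dict.keys_foldl_insert_key, hkeysBase,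
        set_update_of_subset _ _ hsub1, set_update_of_subset _ _ hsub2]
  have hndA : (keys.foldl (fun out key => out.insert key (valA cj ow key)) PySem.Dict.empty).keys.Nodup := by
    rw [hkeysA]; exact PySem.Set.nodup_ofList keys
  have hndB : (((keys.foldl (fun d k => d.insert k (none : Option String)) PySem.Dict.empty).update ps1).update ps2).keys.Nodup := by
    rw [hkeysB]; exact PySem.Set.nodup_ofList keys
  rw [PySem.Dict.items_eq_map_keys _ hndA none, PySem.Dict.items_eq_map_keys _ hndB none,
      hkeysA, hkeysB]
  apply List.map_congr_left
  intro k hk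
  have hkmem : k ∈ keys := (PySem.Set.mem_ofList keys k).mp hk
  -- A's value at k
  have hgA : (keys.foldl (fun out key => out.insert key (valA cj ow key)) PySem.Dict.empty).get? k
      = some (valA cj ow k) := by
    rw [getq_foldl_insert_fun, if_pos hkmem]
  -- B's value at k
  have hgBase : (keys.foldl (fun d k => d.insert k (none : Option String)) PySem.Dict.empty).get? k
      = some none := by
    rw [getq_foldl_insert_fun (fun _ => (none : Option String)), if_pos hkmem]
  have hgB : (((keys.foldl (fun d k => d.insert k (none : Option String)) PySem.Dict.empty).update ps1).update ps2).get? k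
      = (List.lookup k ps2).or ((List.lookup k ps1).or (some none)) := by
    unfold PySem.Dict.update
    rw [getq_foldl_insert_pairs ps2 hnd2, getq_foldl_insert_pairs ps1 hnd1, hgBase]
  have hcontains : (PySem.Set.ofList keys).contains k = true := by
    simpa [PySem.Set.contains, List.contains_iff_mem] using hk
  have hlk2 : List.lookup k ps2 = (List.lookup k cj).map some :=
    lookup_filter_keep _ _ hcontains cj
  have hlk1 : List.lookup k ps1 = (List.lookup k ow).map some :=
    lookup_filter_keep _ _ hcontains ow
  -- compare the stored values
  refine Prod.ext rfl ?_
  show (keys.foldl (fun out key => out.insert key (valA cj ow key)) PySem.Dict.empty).getD k none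
      = (((keys.foldl (fun d k => d.insert k (none : Option String)) PySem.Dict.empty).update ps1).update ps2).getD k none
  rw [PySem.Dict.getD_eq_get?_getD, PySem.Dict.getD_eq_get?_getD, hgA, hgB, hlk1, hlk2]
  unfold valA
  cases hcl : List.lookup k cj with
  | some v =>
    have hmemcj : k ∈ cj.map Prod.fst := mem_of_lookup_some hcl
    rw [if_neg, dict_mk_get?_eq_lookup, hcl]
    · rfl
    · simp [PySem.Set.contains, PySem.Set.mem_ofList, hmemcj]
  | none =>
    have hmemcj : k ∉ cj.map Prod.fst := fun hmem => lookup_ne_none_of_mem hmem hcl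
    rw [if_pos]
    swap
    · simp [PySem.Set.contains, PySem.Set.mem_ofList, hmemcj]
    cases hol : List.lookup k ow with
    | some w =>
      have hmemow : k ∈ ow.map Prod.fst := mem_of_lookup_some hol
      have hownil : ow ≠ [] := by
        intro h; subst h; simp at hmemow
      rw [if_pos, dict_mk_get?_eq_lookup, hol]
      · rfl
      · exact ⟨hownil, by simp [PySem.Set.contains, PySem.Set.mem_ofList, hmemow]⟩
    | none =>
      have hmemow : k ∉ ow.map Prod.fst := fun hmem => lookup_ne_none_of_mem hmem hol
      rw [if_neg]
      · rfl
      · rintro ⟨-, hcon⟩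
        simp [PySem.Set.contains, PySem.Set.mem_ofList] at hcon
        obtain ⟨v, hv⟩ := hcon
        exact hmemow (List.mem_map.mpr ⟨(k, v), hv, rfl⟩)
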